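-- pv_equiv track=rewrite | github.com/eliottcassidy2000/math | 04-computation/t11_omega_dims_highdeg.py | enumerate_diff_seqs
-- ===== SOURCE A (Python) =====
-- def enumerate_diff_seqs(S, n, max_deg):
--     """Enumerate all valid difference sequences up to max_deg."""
--     S_sorted = sorted(S)
--     seqs = {0: [()]}
--     partial_sums = {(): frozenset([0])}
--     partial_last = {(): 0}
--
--     for m in range(1, max_deg + 1):
--         prev = seqs[m - 1]
--         new = []
--         new_ps = {}
--         new_last = {}
--         for seq in prev:
--             ps = partial_sums[seq]
--             last = partial_last[seq]
--             for s in S_sorted: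
--                 nls = (last + s) % n
--                 if nls not in ps:
--                     ns = seq + (s,)
--                     new.append(ns)
--                     new_ps[ns] = ps | frozenset([nls])
--                     new_last[ns] = nls
--         seqs[m] = new
--         partial_sums.update(new_ps)
--         partial_last.update(new_last)
--
--     return seqs
-- ===== SOURCE B (Python) =====
-- def enumerate_diff_seqs(S, n, max_deg):
--     """Enumerate all valid difference sequences up to max_deg (recursive DFS)."""
--     S_sorted = sorted(S)
--
--     def levels(seq, seen, last, depth_left):
--         out = [[seq]] + [[] for _ in range(depth_left)]
--         if depth_left > 0:
--             for s in S_sorted: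
--                 nls = (last + s) % n
--                 if nls not in seen:
--                     sub = levels(seq + (s,), seen | frozenset([nls]), nls, depth_left - 1)
--                     for i, lvl in enumerate(sub):
--                         out[i + 1].extend(lvl)
--         return out
--
--     lv = levels((), frozenset([0]), 0, max_deg)
--     return {m: lvl for m, lvl in enumerate(lv)}
-- ===== Notes on version B (the rewrite author's own statement) =====
-- stated objective: alternative
-- what changed: Replaced A's iterative level-by-level (BFS) loop, which memoizes every sequence's partial-sum set and last residue in global dicts keyed by tuples, with a recursive depth-first enumeration that threads (seen, last) down the call and returns the per-depth lists directly, merging children's level lists; no dictionaries are built at all.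
import Mathlib
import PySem

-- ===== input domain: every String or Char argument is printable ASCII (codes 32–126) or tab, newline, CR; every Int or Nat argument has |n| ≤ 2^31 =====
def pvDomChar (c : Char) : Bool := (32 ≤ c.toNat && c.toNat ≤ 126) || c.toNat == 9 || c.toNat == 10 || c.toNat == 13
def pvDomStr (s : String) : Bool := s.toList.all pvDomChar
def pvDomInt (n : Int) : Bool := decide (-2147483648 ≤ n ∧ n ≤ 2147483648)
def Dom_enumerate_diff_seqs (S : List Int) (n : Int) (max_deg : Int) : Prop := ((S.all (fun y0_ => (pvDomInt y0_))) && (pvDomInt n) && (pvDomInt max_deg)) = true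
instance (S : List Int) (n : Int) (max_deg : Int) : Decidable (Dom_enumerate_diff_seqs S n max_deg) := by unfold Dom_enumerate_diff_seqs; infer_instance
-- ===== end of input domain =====

-- B replaces A's iterative level-by-level loop with global memo dicts by a recursive
-- depth-first enumeration that returns the per-depth lists directly (objective: alternative).

-- ===== PORT A =====
-- inner loop body of A: 'for s in S_sorted: nls = (last+s)%n; if nls not in ps: …'
def pvBodyS (n : Int) (ps : PySem.Set Int) (last : Int) (seq : List Int)
    (st : List (List Int) × PySem.Dict (List Int) (PySem.Set Int) × PySem.Dict (List Int) Int) (s : Int) :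
    List (List Int) × PySem.Dict (List Int) (PySem.Set Int) × PySem.Dict (List Int) Int :=
  let nls := PySem.Int.mod (last + s) n
  if PySem.Set.contains ps nls then st
  else
    let ns := seq ++ [s]
    (st.1 ++ [ns], st.2.1.insert ns (PySem.Set.union ps [nls]), st.2.2.insert ns nls)

-- one iteration of A's 'for m in range(1, max_deg+1)' loop over the state (seqs, partial_sums, partial_last)
def pvStepA (Ss : List Int) (n : Int)
    (acc : PySem.Dict Int (List (List Int)) × PySem.Dict (List Int) (PySem.Set Int) × PySem.Dict (List Int) Int)
    (m : Int) :
    PySem.Dict Int (List (List Int)) × PySem.Dict (List Int) (PySem.Set Int) × PySem.Dict (List Int) Int :=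
  let prev := (acc.1.get? (m - 1)).getD []
  let inner := prev.foldl
    (fun st seq =>
      Ss.foldl (pvBodyS n ((acc.2.1.get? seq).getD PySem.Set.empty) ((acc.2.2.get? seq).getD 0) seq) st)
    ([], PySem.Dict.empty, PySem.Dict.empty)
  (acc.1.insert m inner.1, acc.2.1.update inner.2.1.items, acc.2.2.update inner.2.2.items)

def enumerate_diff_seqs (S : List Int) (n : Int) (max_deg : Int) : List (Int × List (List Int)) :=
  let S_sorted := PySem.List.sorted S (fun x => x) false
  (((PySem.List.pyRange 1 (max_deg + 1) 1).foldl (pvStepA S_sorted n)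
      (PySem.Dict.ofList [((0 : Int), [([] : List Int)])],
       PySem.Dict.ofList [(([] : List Int), PySem.Set.ofList [0])],
       PySem.Dict.ofList [(([] : List Int), (0 : Int))])).1).items

-- ===== PORT B =====
-- 'levels(seq, seen, last, depth_left)' of Source B
-- 'for i, lvl in enumerate(sub): out[i+1].extend(lvl)' of Source B: merge sub into out's tail
def pvMerge (out sub : List (List (List Int))) : List (List (List Int)) :=
  match out with
  | [] => []
  | h0 :: t => h0 :: List.zipWith (fun a b => a ++ b) t sub

def pvLevelsB (Ss : List Int) (n : Int) (seq : List Int) (seen : PySem.Set Int) (last : Int) (d : Int) :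
    List (List (List Int)) :=
  let out0 : List (List (List Int)) := [seq] :: List.replicate d.toNat []
  if h : 0 < d then
    Ss.foldl
      (fun out s =>
        let nls := PySem.Int.mod (last + s) n
        if PySem.Set.contains seen nls then out
        else pvMerge out (pvLevelsB Ss n (seq ++ [s]) (PySem.Set.union seen [nls]) nls (d - 1)))
      out0
  else out0
termination_by d.toNat
decreasing_by omega

def enumerate_diff_seqs_alt (S : List Int) (n : Int) (max_deg : Int) : List (Int × List (List Int)) :=
  let S_sorted := PySem.List.sorted S (fun x => x) false
  -- '{m: lvl for m, lvl in enumerate(lv)}': keys 0,1,2,… are distinct, so the dict IS this association list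
  PySem.List.enumerate (pvLevelsB S_sorted n [] (PySem.Set.ofList [0]) 0 max_deg) 0

-- ===== PRECONDITION & SPEC =====
-- Pre_ excludes exactly the inputs on which A raises ZeroDivisionError: '(last + s) % n' with n == 0,
-- which is reached iff max_deg >= 1 and S is nonempty (B raises at the same spot there).
def Pre_enumerate_diff_seqs (S : List Int) (n : Int) (max_deg : Int) : Prop :=
  n ≠ 0 ∨ max_deg < 1 ∨ S = []
instance (S : List Int) (n : Int) (max_deg : Int) : Decidable (Pre_enumerate_diff_seqs S n max_deg) := by
  unfold Pre_enumerate_diff_seqs; infer_instance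

def pvWitness_enumerate_diff_seqs : List Int × Int × Int := ([1, 2], 5, 3)

def Spec_enumerate_diff_seqs (S : List Int) (n : Int) (max_deg : Int) (out : List (Int × List (List Int))) : Prop := out = enumerate_diff_seqs_alt S n max_deg
instance (S : List Int) (n : Int) (max_deg : Int) (out : List (Int × List (List Int))) : Decidable (Spec_enumerate_diff_seqs S n max_deg out) := by unfold Spec_enumerate_diff_seqs; infer_instance

-- ===== CLAIM (what is proved, stated in full; the proofs are below) =====
def Claim_equal_enumerate_diff_seqs : Prop := ∀ (S : List Int) (n : Int) (max_deg : Int), Dom_enumerate_diff_seqs S n max_deg → Pre_enumerate_diff_seqs S n max_deg → Spec_enumerate_diff_seqs S n max_deg (enumerate_diff_seqs S n max_deg)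

-- ===== LEMMAS AND PROOFS =====

-- the (seen, last) pair both programs carry along a sequence q, computed from q alone
def pvT (n : Int) (q : List Int) : PySem.Set Int × Int :=
  q.foldl (fun p s => (PySem.Set.union p.1 [PySem.Int.mod (p.2 + s) n], PySem.Int.mod (p.2 + s) n))
    (PySem.Set.ofList [0], 0)

-- the children of sequence q produced by scanning the list l of step values
def pvExpand (l : List Int) (n : Int) (q : List Int) : List (List Int) :=
  l.flatMap fun s =>
    if PySem.Set.contains (pvT n q).1 (PySem.Int.mod ((pvT n q).2 + s) n) then [] else [q ++ [s]]

-- k-fold expansion: the depth-k descendants (in order) of the sequences qs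
def pvLr (Ss : List Int) (n : Int) : Nat → List (List Int) → List (List Int)
  | 0, qs => qs
  | k + 1, qs => pvLr Ss n k (qs.flatMap (pvExpand Ss n))

lemma pvT_snoc (n : Int) (q : List Int) (s : Int) :
    pvT n (q ++ [s]) =
      (PySem.Set.union (pvT n q).1 [PySem.Int.mod ((pvT n q).2 + s) n], PySem.Int.mod ((pvT n q).2 + s) n) := by
  simp [pvT, List.foldl_append]

lemma pvLr_append (Ss : List Int) (n : Int) :
    ∀ (k : Nat) (xs ys : List (List Int)), pvLr Ss n k (xs ++ ys) = pvLr Ss n k xs ++ pvLr Ss n k ys := by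
  intro k
  induction k with
  | zero => intro xs ys; rfl
  | succ k ih => intro xs ys; simp [pvLr, List.flatMap_append, ih]

lemma pvLr_nil (Ss : List Int) (n : Int) : ∀ k : Nat, pvLr Ss n k [] = [] := by
  intro k; induction k with
  | zero => rfl
  | succ k ih => simp [pvLr, ih]

lemma pvLr_succ_out (Ss : List Int) (n : Int) :
    ∀ (k : Nat) (qs : List (List Int)), pvLr Ss n (k + 1) qs = (pvLr Ss n k qs).flatMap (pvExpand Ss n) := by
  intro k
  induction k with
  | zero => intro qs; rfl
  | succ k ih => intro qs; rw [show k + 1 + 1 = (k + 1) + 1 from rfl]; rw [pvLr, ih]; rfl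

-- pvLr (k+1) [q] peels the first expansion: pvLr (k+1) [q] = pvLr k (pvExpand Ss n q)
lemma pvLr_succ_out' (Ss : List Int) (n : Int) (k : Nat) (q : List Int) :
    pvLr Ss n k (pvExpand Ss n q) = pvLr Ss n (k + 1) [q] := by
  rw [pvLr]
  simp

-- ===== B-side: pvLevelsB computes the per-depth descendant lists =====
lemma pvLevelsB_eq (Ss : List Int) (n : Int) :
    ∀ (D : Nat) (d : Int), d.toNat = D → ∀ q : List Int,
      pvLevelsB Ss n q (pvT n q).1 (pvT n q).2 d =
        (List.range (d.toNat + 1)).map (fun k => pvLr Ss n k [q]) := by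
  intro D
  induction D with
  | zero =>
      intro d hd q
      have h0 : ¬ 0 < d := by omega
      rw [pvLevelsB, dif_neg h0, hd]
      simp [pvLr]
  | succ N ih =>
      intro d hd q
      have h0 : 0 < d := by omega
      have hd1 : (d - 1).toNat = N := by omega
      rw [pvLevelsB, dif_pos h0]
      have key : ∀ (l : List Int) (cs : List (List Int)),
          l.foldl
            (fun out s =>
              let nls := PySem.Int.mod ((pvT n q).2 + s) n
              if PySem.Set.contains (pvT n q).1 nls then out
              else pvMerge out (pvLevelsB Ss n (q ++ [s]) (PySem.Set.union (pvT n q).1 [nls]) nls (d - 1)))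
            ([q] :: (List.range d.toNat).map (fun k => pvLr Ss n k cs)) =
          [q] :: (List.range d.toNat).map (fun k => pvLr Ss n k (cs ++ pvExpand l n q)) := by
        intro l
        induction l with
        | nil => intro cs; simp [pvExpand]
        | cons s l ihl =>
            intro cs
            simp only [List.foldl_cons]
            by_cases hc : PySem.Set.contains (pvT n q).1 (PySem.Int.mod ((pvT n q).2 + s) n)
            · have hm := (PySem.Set.contains_iff _ _).mp hc
              rw [if_pos hc, ihl cs]
              have he : pvExpand (s :: l) n q = pvExpand l n q := by simp [pvExpand, hm]
              rw [he]
            · have hm : PySem.Int.mod ((pvT n q).2 + s) n ∉ (pvT n q).1 :=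
                fun h => hc ((PySem.Set.contains_iff _ _).mpr h)
              rw [if_neg hc]
              have hq' := pvT_snoc n q s
              have hsub : pvLevelsB Ss n (q ++ [s])
                    (PySem.Set.union (pvT n q).1 [PySem.Int.mod ((pvT n q).2 + s) n])
                    (PySem.Int.mod ((pvT n q).2 + s) n) (d - 1) =
                  (List.range d.toNat).map (fun k => pvLr Ss n k [q ++ [s]]) := by
                have h1 : (PySem.Set.union (pvT n q).1 [PySem.Int.mod ((pvT n q).2 + s) n]) = (pvT n (q ++ [s])).1 := by
                  rw [hq']
                have h2 : (PySem.Int.mod ((pvT n q).2 + s) n) = (pvT n (q ++ [s])).2 := by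
                  rw [hq']
                rw [h1]
                conv_lhs => rw [h2]
                rw [ih (d - 1) hd1 (q ++ [s]), hd1, show N + 1 = d.toNat from by omega]
              rw [hsub]
              rw [show pvMerge ([q] :: (List.range d.toNat).map (fun k => pvLr Ss n k cs))
                    ((List.range d.toNat).map (fun k => pvLr Ss n k [q ++ [s]])) =
                  [q] :: (List.range d.toNat).map (fun k => pvLr Ss n k cs ++ pvLr Ss n k [q ++ [s]]) from by
                simp [pvMerge]]
              have hjoin : ∀ k : Nat, pvLr Ss n k cs ++ pvLr Ss n k [q ++ [s]] = pvLr Ss n k (cs ++ [q ++ [s]]) :=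
                fun k => (pvLr_append Ss n k cs [q ++ [s]]).symm
              simp only [hjoin]
              rw [ihl (cs ++ [q ++ [s]])]
              have he : pvExpand (s :: l) n q = (q ++ [s]) :: pvExpand l n q := by
                simp [pvExpand, hm]
              rw [he]
              simp [List.append_assoc]
      have base : ([q] :: List.replicate d.toNat ([] : List (List Int))) =
          [q] :: (List.range d.toNat).map (fun k => pvLr Ss n k ([] : List (List Int))) := by
        congr 1
        rw [List.map_congr_left (fun k _ => pvLr_nil Ss n k)]
        simp [List.map_const']
      rw [base, key Ss []]
      rw [List.range_succ_eq_map]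
      simp only [List.map_cons, List.map_map, List.nil_append]
      congr 1
      apply List.map_congr_left
      intro k _
      simp only [Function.comp_apply, Nat.succ_eq_add_one]
      rw [pvLr_succ_out']

-- ===== A-side dict lemmas =====
lemma pv_get?_foldl_insert_of_not_mem {ν : Type} (f : List Int → ν) :
    ∀ (l : List (List Int)) (d : PySem.Dict (List Int) ν) (k : List Int), k ∉ l →
      (l.foldl (fun d c => d.insert c (f c)) d).get? k = d.get? k := by
  intro l
  induction l with
  | nil => intro d k _; rfl
  | cons c l ih =>
      intro d k hk
      simp only [List.mem_cons, not_or] at hk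
      simp only [List.foldl_cons]
      rw [ih _ k hk.2, PySem.Dict.get?_insert_of_ne _ _ hk.1]

lemma pv_get?_foldl_insert_fn {ν : Type} (f : List Int → ν) :
    ∀ (l : List (List Int)) (d : PySem.Dict (List Int) ν) (k : List Int), k ∈ l →
      (l.foldl (fun d c => d.insert c (f c)) d).get? k = some (f k) := by
  intro l
  induction l with
  | nil => intro d k hk; exact absurd hk (List.not_mem_nil)
  | cons c l ih =>
      intro d k hk
      simp only [List.foldl_cons]
      by_cases hkl : k ∈ l
      · exact ih _ k hkl
      · have hkc : k = c := by
          rcases List.mem_cons.mp hk with h | h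
          · exact h
          · exact absurd h hkl
        rw [pv_get?_foldl_insert_of_not_mem f l _ k hkl, hkc, PySem.Dict.get?_insert_self]

lemma pv_get?_some_mem_items {ν : Type} (d : PySem.Dict (List Int) ν) (k : List Int) (v : ν)
    (h : d.get? k = some v) : (k, v) ∈ d.items := by
  cases hf : List.find? (fun p => p.1 == k) d.items with
  | none => simp [PySem.Dict.get?, hf] at h
  | some pr =>
      have hm := List.mem_of_find?_eq_some hf
      have hp := List.find?_some hf
      have h1 : pr.1 = k := by exact eq_of_beq hp
      have h2 : pr.2 = v := by simp [PySem.Dict.get?, hf] at h; exact h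
      have : pr = (k, v) := by cases pr; simp_all
      rwa [this] at hm

lemma pv_get?_foldl_insert_pairs_not_mem {ν : Type} :
    ∀ (prs : List (List Int × ν)) (p : PySem.Dict (List Int) ν) (k : List Int),
      k ∉ prs.map (·.1) →
      (prs.foldl (fun d pr => d.insert pr.1 pr.2) p).get? k = p.get? k := by
  intro prs
  induction prs with
  | nil => intro p k _; rfl
  | cons pr prs ih =>
      intro p k hk
      simp only [List.map_cons, List.mem_cons, not_or] at hk
      simp only [List.foldl_cons]
      rw [ih _ k hk.2, PySem.Dict.get?_insert_of_ne _ _ hk.1]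

lemma pv_get?_foldl_insert_pairs {ν : Type} :
    ∀ (prs : List (List Int × ν)) (p : PySem.Dict (List Int) ν) (k : List Int) (v : ν),
      (prs.map (·.1)).Nodup → (k, v) ∈ prs →
      (prs.foldl (fun d pr => d.insert pr.1 pr.2) p).get? k = some v := by
  intro prs
  induction prs with
  | nil => intro p k v _ hm; exact absurd hm (List.not_mem_nil)
  | cons pr prs ih =>
      intro p k v hnd hm
      simp only [List.map_cons, List.nodup_cons] at hnd
      simp only [List.foldl_cons]
      rcases List.mem_cons.mp hm with h | h
      · have hk1 : pr.1 = k := by rw [← h]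
        have hkn : k ∉ prs.map (·.1) := by rw [← hk1]; exact hnd.1
        rw [pv_get?_foldl_insert_pairs_not_mem prs _ k hkn, ← hk1,
          show pr.2 = v from by rw [← h]]
        exact PySem.Dict.get?_insert_self _ _ _
      · exact ih _ k v hnd.2 h

lemma pv_get?_update_of_get? {ν : Type} (p d2 : PySem.Dict (List Int) ν) (k : List Int) (v : ν)
    (hnd : d2.keys.Nodup) (h : d2.get? k = some v) : (p.update d2.items).get? k = some v := by
  exact pv_get?_foldl_insert_pairs d2.items p k v hnd (pv_get?_some_mem_items d2 k v h)

-- ===== A-side: the inner loops compute pvExpand plus function-valued inserts =====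
lemma pvInnerS (n : Int) (q : List Int) :
    ∀ (l : List Int) (acc : List (List Int) × PySem.Dict (List Int) (PySem.Set Int) × PySem.Dict (List Int) Int),
      l.foldl (pvBodyS n (pvT n q).1 (pvT n q).2 q) acc =
        (acc.1 ++ pvExpand l n q,
         (pvExpand l n q).foldl (fun d c => d.insert c (pvT n c).1) acc.2.1,
         (pvExpand l n q).foldl (fun d c => d.insert c (pvT n c).2) acc.2.2) := by
  intro l
  induction l with
  | nil => intro acc; simp [pvExpand]
  | cons s l ih =>
      intro acc
      simp only [List.foldl_cons]
      by_cases hc : PySem.Set.contains (pvT n q).1 (PySem.Int.mod ((pvT n q).2 + s) n)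
      · rw [show pvBodyS n (pvT n q).1 (pvT n q).2 q acc s = acc from by unfold pvBodyS; rw [if_pos hc]]
        rw [ih acc]
        have hm := (PySem.Set.contains_iff _ _).mp hc
        have he : pvExpand (s :: l) n q = pvExpand l n q := by simp [pvExpand, hm]
        rw [he]
      · rw [show pvBodyS n (pvT n q).1 (pvT n q).2 q acc s =
              (acc.1 ++ [q ++ [s]],
               acc.2.1.insert (q ++ [s]) (PySem.Set.union (pvT n q).1 [PySem.Int.mod ((pvT n q).2 + s) n]),
               acc.2.2.insert (q ++ [s]) (PySem.Int.mod ((pvT n q).2 + s) n)) from by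
            unfold pvBodyS; rw [if_neg hc]]
        rw [ih]
        have hm : PySem.Int.mod ((pvT n q).2 + s) n ∉ (pvT n q).1 :=
          fun h => hc ((PySem.Set.contains_iff _ _).mpr h)
        have he : pvExpand (s :: l) n q = (q ++ [s]) :: pvExpand l n q := by
          simp [pvExpand, hm]
        rw [he]
        simp only [List.foldl_cons, List.append_assoc, List.singleton_append]
        rw [pvT_snoc]

lemma pvInnerP (Ss : List Int) (n : Int) (psums : PySem.Dict (List Int) (PySem.Set Int))
    (plast : PySem.Dict (List Int) Int) :
    ∀ (qs : List (List Int)) (acc : List (List Int) × PySem.Dict (List Int) (PySem.Set Int) × PySem.Dict (List Int) Int),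
      (∀ q ∈ qs, psums.get? q = some (pvT n q).1) →
      (∀ q ∈ qs, plast.get? q = some (pvT n q).2) →
      qs.foldl
        (fun st seq =>
          Ss.foldl (pvBodyS n ((psums.get? seq).getD PySem.Set.empty) ((plast.get? seq).getD 0) seq) st) acc =
        (acc.1 ++ qs.flatMap (pvExpand Ss n),
         (qs.flatMap (pvExpand Ss n)).foldl (fun d c => d.insert c (pvT n c).1) acc.2.1,
         (qs.flatMap (pvExpand Ss n)).foldl (fun d c => d.insert c (pvT n c).2) acc.2.2) := by
  intro qs
  induction qs with
  | nil => intro acc _ _; simp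
  | cons q qs ih =>
      intro acc h1 h2
      simp only [List.foldl_cons]
      rw [h1 q (List.mem_cons_self), h2 q (List.mem_cons_self)]
      simp only [Option.getD_some]
      rw [pvInnerS n q Ss acc]
      rw [ih _ (fun x hx => h1 x (List.mem_cons_of_mem _ hx)) (fun x hx => h2 x (List.mem_cons_of_mem _ hx))]
      simp [List.foldl_append, List.append_assoc]

-- ===== A-side: the outer loop invariant =====
def pvInvA (Ss : List Int) (n : Int) (t : Nat)
    (acc : PySem.Dict Int (List (List Int)) × PySem.Dict (List Int) (PySem.Set Int) × PySem.Dict (List Int) Int) : Prop :=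
  acc.1.items = (List.range (t + 1)).map (fun (k : Nat) => ((k : Int), pvLr Ss n k [[]]))
  ∧ acc.1.get? (t : Int) = some (pvLr Ss n t [[]])
  ∧ (∀ q ∈ pvLr Ss n t [[]], acc.2.1.get? q = some (pvT n q).1)
  ∧ (∀ q ∈ pvLr Ss n t [[]], acc.2.2.get? q = some (pvT n q).2)

lemma pvStepA_inv (Ss : List Int) (n : Int) (t : Nat)
    (acc : PySem.Dict Int (List (List Int)) × PySem.Dict (List Int) (PySem.Set Int) × PySem.Dict (List Int) Int)
    (h : pvInvA Ss n t acc) : pvInvA Ss n (t + 1) (pvStepA Ss n acc ((t : Int) + 1)) := by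
  obtain ⟨h1, h2, h3, h4⟩ := h
  have hprev : (acc.1.get? ((t : Int) + 1 - 1)).getD [] = pvLr Ss n t [[]] := by
    rw [show (t : Int) + 1 - 1 = (t : Int) from by ring, h2]
    rfl
  have hinner := pvInnerP Ss n acc.2.1 acc.2.2 (pvLr Ss n t [[]])
    ([], PySem.Dict.empty, PySem.Dict.empty) h3 h4
  have hC : (pvLr Ss n t [[]]).flatMap (pvExpand Ss n) = pvLr Ss n (t + 1) [[]] :=
    (pvLr_succ_out Ss n t [[]]).symm
  rw [hC] at hinner
  have hcont : acc.1.contains ((t : Int) + 1) = false := by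
    have hk : ((t : Int) + 1) ∉ acc.1.keys := by
      rw [show acc.1.keys = acc.1.items.map (·.1) from rfl, h1]
      simp only [List.map_map, List.mem_map, List.mem_range, Function.comp_apply, not_exists]
      intro k hk
      obtain ⟨hklt, hkeq⟩ := hk
      omega
    rcases Bool.eq_false_or_eq_true (acc.1.contains ((t : Int) + 1)) with hb | hb
    · exact absurd ((PySem.Dict.contains_iff_mem_keys _ _).mp hb) hk
    · exact hb
  have hitems : (acc.1.insert ((t : Int) + 1) (pvLr Ss n (t + 1) [[]])).items =
      acc.1.items ++ [(((t : Int) + 1), pvLr Ss n (t + 1) [[]])] := by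
    rw [PySem.Dict.insert, if_neg (by simp [hcont])]
  simp only [pvStepA]
  rw [hprev, hinner]
  simp only [List.nil_append]
  refine ⟨?_, ?_, ?_, ?_⟩
  · rw [hitems, h1]
    conv_rhs => rw [List.range_succ, List.map_append]
    simp
  · rw [show ((t + 1 : Nat) : Int) = (t : Int) + 1 from by push_cast; ring]
    exact PySem.Dict.get?_insert_self _ _ _
  · intro q hq
    have hnd : ((pvLr Ss n (t + 1) [[]]).foldl
        (fun d c => d.insert c (pvT n c).1) PySem.Dict.empty).keys.Nodup := by
      exact PySem.Dict.nodup_keys_foldl_insert _ (fun _ c => (pvT n c).1) _ List.nodup_nil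
    exact pv_get?_update_of_get? _ _ q _ hnd (pv_get?_foldl_insert_fn _ _ _ q hq)
  · intro q hq
    have hnd : ((pvLr Ss n (t + 1) [[]]).foldl
        (fun d c => d.insert c (pvT n c).2) PySem.Dict.empty).keys.Nodup := by
      exact PySem.Dict.nodup_keys_foldl_insert _ (fun _ c => (pvT n c).2) _ List.nodup_nil
    exact pv_get?_update_of_get? _ _ q _ hnd (pv_get?_foldl_insert_fn _ _ _ q hq)

lemma pvRunA_inv (Ss : List Int) (n : Int) :
    ∀ t : Nat,
      pvInvA Ss n t
        ((PySem.List.pyRange 1 ((t : Int) + 1) 1).foldl (pvStepA Ss n)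
          (PySem.Dict.ofList [((0 : Int), [([] : List Int)])],
           PySem.Dict.ofList [(([] : List Int), PySem.Set.ofList [0])],
           PySem.Dict.ofList [(([] : List Int), (0 : Int))])) := by
  intro t
  induction t with
  | zero =>
      rw [show ((0 : Nat) : Int) + 1 = 1 from by norm_num, PySem.List.pyRange_one_eq_nil (by omega)]
      refine ⟨rfl, rfl, ?_, ?_⟩
      · intro q hq
        have : q = [] := by simpa [pvLr] using hq
        subst this
        rfl
      · intro q hq
        have : q = [] := by simpa [pvLr] using hq
        subst this
        rfl
  | succ t ih =>
      rw [show ((t + 1 : Nat) : Int) + 1 = ((t : Int) + 1) + 1 from by push_cast; ring]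
      rw [PySem.List.pyRange_one_succ_right (by omega), List.foldl_append, List.foldl_cons, List.foldl_nil]
      exact pvStepA_inv Ss n t _ ih

lemma pv_pyRange_toNat (md : Int) :
    PySem.List.pyRange 1 (md + 1) 1 = PySem.List.pyRange 1 ((md.toNat : Int) + 1) 1 := by
  rcases le_or_gt md 0 with h | h
  · rw [PySem.List.pyRange_one_eq_nil (by omega), PySem.List.pyRange_one_eq_nil (by omega)]
  · congr 1; omega

lemma pv_enumerate_map_range {α : Type} :
    ∀ (m : Nat) (f : Nat → α) (s : Int),
      PySem.List.enumerate ((List.range m).map f) s = (List.range m).map (fun (k : Nat) => (s + (k : Int), f k)) := by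
  intro m
  induction m with
  | zero => intro f s; rfl
  | succ m ih =>
      intro f s
      rw [List.range_succ_eq_map]
      simp only [List.map_cons, List.map_map, PySem.List.enumerate_cons]
      rw [ih (f ∘ Nat.succ) (s + 1)]
      congr 1
      · simp
      · apply List.map_congr_left
        intro k _
        simp only [Function.comp_apply, Nat.succ_eq_add_one]
        congr 1
        push_cast; ring

-- ===== VERDICT (by name: the statement is the Claim_ definition above) =====
theorem enumerate_diff_seqs_spec : Claim_equal_enumerate_diff_seqs := by
  intro S n max_deg _dom _pre
  unfold Spec_enumerate_diff_seqs
  simp only [enumerate_diff_seqs, enumerate_diff_seqs_alt]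
  rw [pv_pyRange_toNat max_deg]
  have hA := pvRunA_inv (PySem.List.sorted S (fun x => x) false) n max_deg.toNat
  unfold pvInvA at hA
  obtain ⟨hA1, -, -, -⟩ := hA
  rw [hA1]
  have hB : pvLevelsB (PySem.List.sorted S (fun x => x) false) n [] (PySem.Set.ofList [0]) 0 max_deg =
      (List.range (max_deg.toNat + 1)).map
        (fun k => pvLr (PySem.List.sorted S (fun x => x) false) n k [[]]) :=
    pvLevelsB_eq (PySem.List.sorted S (fun x => x) false) n max_deg.toNat max_deg rfl []
  rw [hB, pv_enumerate_map_range]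
  apply List.map_congr_left
  intro k _
  simp
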